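-- pv_equiv track=rewrite | github.com/nobe0716/problem_solving | codeforces/contests/1334/A. Hilbert's Hotel.py | solve
-- ===== SOURCE A (Python) =====
-- def solve(n, a):
--     s = set()
--     for i, v in enumerate(a, start=1):
--         c = (i + v) % n
--         if c in s:
--             return False
--         s.add(c)
--
--     return True
-- ===== SOURCE B (Python) =====
-- def solve(n, a):
--     vals = sorted((i + v) % n for i, v in enumerate(a, start=1))
--     for x, y in zip(vals, vals[1:]):
--         if x == y:
--             return False
--     return True
-- ===== Notes on version B (the rewrite author's own statement) =====
-- stated objective: alternative
-- what changed: Replaces the incremental hash-set membership loop with building the full list of (i+v) mod n values, sorting it, and scanning for an adjacent equal pair.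
import Mathlib
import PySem

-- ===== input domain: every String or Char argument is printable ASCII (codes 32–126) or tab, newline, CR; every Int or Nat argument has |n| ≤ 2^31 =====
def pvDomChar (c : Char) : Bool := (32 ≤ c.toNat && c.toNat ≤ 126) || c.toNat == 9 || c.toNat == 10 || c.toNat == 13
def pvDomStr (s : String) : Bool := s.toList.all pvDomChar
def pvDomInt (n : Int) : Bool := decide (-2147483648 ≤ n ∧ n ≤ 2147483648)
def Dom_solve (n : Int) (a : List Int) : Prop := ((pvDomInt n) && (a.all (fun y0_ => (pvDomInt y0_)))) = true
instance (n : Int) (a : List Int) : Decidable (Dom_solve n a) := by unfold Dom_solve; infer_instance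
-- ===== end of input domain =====

-- B sorts the shifted values and scans adjacent pairs instead of A's incremental membership set; same cost class, alternative algorithm.

-- ===== PORT A =====
-- the 'for i, v in enumerate(a, start=1)' loop with early return, carrying the set s
def solveLoopA (n : Int) : List (Int × Int) → PySem.Set Int → Bool
  | [], _ => true
  | (i, v) :: rest, s =>
      let c := PySem.Int.mod (i + v) n
      if PySem.Set.contains s c then false
      else solveLoopA n rest (PySem.Set.add s c)

def solve (n : Int) (a : List Int) : Bool :=
  solveLoopA n (PySem.List.enumerate a 1) PySem.Set.empty

-- ===== PORT B =====
-- the 'for x, y in zip(vals, vals[1:])' scan with early return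
def adjScanB : List Int → Bool
  | x :: y :: rest => if x == y then false else adjScanB (y :: rest)
  | _ => true

def solve_alt (n : Int) (a : List Int) : Bool :=
  let vals := PySem.List.sorted
    ((PySem.List.enumerate a 1).map (fun p => PySem.Int.mod (p.1 + p.2) n))
    (fun x => x) false
  adjScanB vals

-- ===== PRECONDITION & SPEC =====
-- Pre_ excludes exactly the inputs where Python raises ZeroDivisionError: n = 0 with a nonempty a (the '% n' is evaluated).
def Pre_solve (n : Int) (a : List Int) : Prop := n ≠ 0 ∨ a = []
instance (n : Int) (a : List Int) : Decidable (Pre_solve n a) := by unfold Pre_solve; infer_instance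
def pvWitness_solve : Int × List Int := (2, [0, 1])

def Spec_solve (n : Int) (a : List Int) (out : Bool) : Prop := out = solve_alt n a
instance (n : Int) (a : List Int) (out : Bool) : Decidable (Spec_solve n a out) := by unfold Spec_solve; infer_instance

-- ===== CLAIM (what is proved, stated in full; the proofs are below) =====
def Claim_equal_solve : Prop := ∀ (n : Int) (a : List Int), Dom_solve n a → Pre_solve n a → Spec_solve n a (solve n a)

-- ===== LEMMAS AND PROOFS =====

-- A's loop returns true iff the remaining shifted values are pairwise distinct and avoid the set built so far
theorem solveLoopA_iff (n : Int) (l : List (Int × Int)) (s : PySem.Set Int) :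
    solveLoopA n l s = true ↔
      (l.map (fun p => PySem.Int.mod (p.1 + p.2) n)).Nodup ∧
      ∀ c ∈ l.map (fun p => PySem.Int.mod (p.1 + p.2) n), c ∉ s := by
  induction l generalizing s with
  | nil => simp [solveLoopA]
  | cons p rest ih =>
      obtain ⟨i, v⟩ := p
      simp only [solveLoopA, List.map_cons, List.nodup_cons, List.mem_cons]
      by_cases hc : PySem.Int.mod (i + v) n ∈ s
      · rw [if_pos ((PySem.Set.contains_iff s _).mpr hc)]
        simp only [Bool.false_eq_true, false_iff, not_and]
        intro _ hav
        exact hav _ (Or.inl rfl) hc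
      · rw [if_neg (fun h => hc ((PySem.Set.contains_iff s _).mp h)), ih]
        constructor
        · rintro ⟨hnd, hav⟩
          refine ⟨⟨fun hmm => ?_, hnd⟩, ?_⟩
          · have := hav _ hmm
            simp [PySem.Set.mem_add] at this
          · rintro c (rfl | hcm)
            · exact hc
            · intro hcs
              exact hav c hcm (by simp [PySem.Set.mem_add, hcs])
        · rintro ⟨⟨hni, hnd⟩, hav⟩
          refine ⟨hnd, fun c hcm => ?_⟩
          simp only [PySem.Set.mem_add]
          rintro (hcs | rfl)
          · exact hav c (Or.inr hcm) hcs
          · exact hni hcm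

-- B's adjacent scan returns true iff no two adjacent elements are equal
theorem adjScanB_iff_chain (l : List Int) :
    adjScanB l = true ↔ l.IsChain (· ≠ ·) := by
  induction l with
  | nil => simp [adjScanB]
  | cons x t ih =>
      cases t with
      | nil => simp [adjScanB]
      | cons y r =>
          rw [List.isChain_cons_cons]
          by_cases h : x = y
          · simp [adjScanB, h]
          · simpa [adjScanB, h] using ih

-- on a ≤-sorted list, adjacent-distinct is exactly Nodup
theorem nodup_iff_chain_of_sorted (l : List Int) (hs : l.Pairwise (· ≤ ·)) :
    l.IsChain (· ≠ ·) ↔ l.Nodup := by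
  induction l with
  | nil => simp
  | cons x t ih =>
      rw [List.pairwise_cons] at hs
      obtain ⟨hx, ht⟩ := hs
      cases t with
      | nil => simp
      | cons y r =>
          rw [List.isChain_cons_cons, List.nodup_cons, ih ht]
          rw [List.pairwise_cons] at ht
          constructor
          · rintro ⟨hxy, hnd⟩
            refine ⟨?_, hnd⟩
            intro hmem
            rcases List.mem_cons.mp hmem with rfl | hxr
            · exact hxy rfl
            · exact hxy (le_antisymm (hx y (List.mem_cons_self)) (ht.1 x hxr))
          · rintro ⟨hxm, hnd⟩
            exact ⟨fun h => hxm (h ▸ List.mem_cons_self), hnd⟩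

-- ===== VERDICT (by name: the statement is the Claim_ definition above) =====
theorem solve_spec : Claim_equal_solve := by
  intro n a _ _
  show solveLoopA n (PySem.List.enumerate a 1) PySem.Set.empty =
    adjScanB (PySem.List.sorted
      ((PySem.List.enumerate a 1).map (fun p => PySem.Int.mod (p.1 + p.2) n)) (fun x => x) false)
  have hA : solveLoopA n (PySem.List.enumerate a 1) PySem.Set.empty = true ↔
      ((PySem.List.enumerate a 1).map (fun p => PySem.Int.mod (p.1 + p.2) n)).Nodup := by
    rw [solveLoopA_iff]
    simp [PySem.Set.empty]
  have hB : adjScanB (PySem.List.sorted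
      ((PySem.List.enumerate a 1).map (fun p => PySem.Int.mod (p.1 + p.2) n)) (fun x => x) false) = true ↔
      ((PySem.List.enumerate a 1).map (fun p => PySem.Int.mod (p.1 + p.2) n)).Nodup := by
    rw [adjScanB_iff_chain,
        nodup_iff_chain_of_sorted _ (by
          simpa using PySem.List.sorted_pairwise
            ((PySem.List.enumerate a 1).map (fun p => PySem.Int.mod (p.1 + p.2) n)) (fun x => x))]
    exact (PySem.List.sorted_perm _ (fun x => x) false).nodup_iff
  cases hres : solveLoopA n (PySem.List.enumerate a 1) PySem.Set.empty with
  | true => exact (hB.mpr (hA.mp hres)).symm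
  | false =>
      cases h2 : adjScanB (PySem.List.sorted
          ((PySem.List.enumerate a 1).map (fun p => PySem.Int.mod (p.1 + p.2) n)) (fun x => x) false) with
      | false => rfl
      | true => exact absurd (hA.mpr (hB.mp h2)) (by rw [hres]; simp)
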